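-- pv_equiv track=rewrite | github.com/bleuxsy/Algorithm | CodingTest/samsung/2024-1-고대문명유적탐사-sol.py | count_clear
-- ===== SOURCE A (Python) =====
-- def bfs(arr, v, si, sj, clr):
--     q= []
--     cnt = 0
--
--     q.append((si, sj))
--     v[si][sj] = 1
--     sset = set()
--     sset.add((si, sj))
--     cnt+= 1
--
--     while q:
--         ci, cj = q.pop(0)
--         for di, dj in ((-1, 0), (1, 0), (0, -1), (0, 1)):
--             ni, nj = ci + di, cj + dj
--             if 0<=ni<5 and 0<=nj<5 and v[ni][nj] == 0 and arr[ni][nj] == arr[ci][cj]: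
--                 q.append((ni, nj))
--                 v[ni][nj] = 1
--                 sset.add((ni, nj))
--                 cnt+= 1
--
--     if cnt >= 3:
--         if clr == 1:
--             for i, j in sset:
--                 arr[i][j] = 0
--         return cnt
--     return 0
--
-- def count_clear(arr, clr):
--     v = [[0]* 5 for _ in range(5)]
--
--     cnt = 0
--     for i in range(5):
--         for j in range(5):
--             if v[i][j] == 0:
--                 t = bfs(arr,v, i, j, clr)
--                 cnt += t
--     return cnt
-- ===== SOURCE B (Python) =====
-- def count_clear(arr, clr):
--     # Per-cell flood-fill closure: compute every cell's component on the original
--     # grid, count cells lying in a component of size >= 3 (equals the sum of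
--     # qualifying component sizes), then clear those cells in place if clr == 1.
--     def comp(si, sj):
--         cells = [(si, sj)]
--         k = 0
--         while k < len(cells):
--             ci, cj = cells[k]
--             for ni, nj in ((ci - 1, cj), (ci + 1, cj), (ci, cj - 1), (ci, cj + 1)):
--                 if 0 <= ni < 5 and 0 <= nj < 5 and (ni, nj) not in cells and arr[ni][nj] == arr[ci][cj]:
--                     cells.append((ni, nj))
--             k += 1
--         return cells
--
--     comps = [comp(i, j) for i in range(5) for j in range(5)]
--     total = sum(1 for c in comps if len(c) >= 3)
--     if clr == 1:
--         for c in comps: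
--             if len(c) >= 3:
--                 for i, j in c:
--                     arr[i][j] = 0
--     return total
-- ===== Notes on version B (the rewrite author's own statement) =====
-- stated objective: alternative
-- what changed: A runs one BFS with a shared 5x5 visited matrix and a FIFO queue, summing qualifying component sizes as it clears; B computes each cell's component independently by a growing worklist closure on the original grid and counts the cells whose component has size >= 3 (clearing afterwards), with no visited matrix and no queue.
import Mathlib
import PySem

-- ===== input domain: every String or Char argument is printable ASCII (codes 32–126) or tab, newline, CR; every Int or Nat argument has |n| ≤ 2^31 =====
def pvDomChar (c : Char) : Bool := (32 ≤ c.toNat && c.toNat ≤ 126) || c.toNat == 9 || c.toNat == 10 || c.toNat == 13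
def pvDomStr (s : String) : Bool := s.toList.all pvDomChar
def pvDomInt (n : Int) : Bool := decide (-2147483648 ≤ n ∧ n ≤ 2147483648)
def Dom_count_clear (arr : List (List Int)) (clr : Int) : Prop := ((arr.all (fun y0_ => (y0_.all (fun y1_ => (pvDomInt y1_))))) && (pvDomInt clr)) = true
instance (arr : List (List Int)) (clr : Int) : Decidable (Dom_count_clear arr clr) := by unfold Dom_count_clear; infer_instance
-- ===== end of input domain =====

-- B replaces A's shared-visited BFS-and-sum with an independent per-cell flood-fill closure
-- that counts cells lying in a component of size ≥ 3 (objective: alternative, same cost class).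
-- Both Pythons mutate `arr` in place when clr == 1; the equivalence proved here is about the
-- RETURN value only (the Lean ports return just the count).

-- ===== PORT A =====
-- one neighbour probe of A's bfs inner `for di, dj in ...` loop; state = (q, v, sset, cnt)
def bfsVisit (arr : List (List Int)) (ci cj : Int)
    (st : List (Int × Int) × List (List Int) × PySem.Set (Int × Int) × Int)
    (d : Int × Int) :
    List (Int × Int) × List (List Int) × PySem.Set (Int × Int) × Int :=
  let ni := ci + d.1
  let nj := cj + d.2
  if (0 ≤ ni ∧ ni < 5 ∧ 0 ≤ nj ∧ nj < 5) ∧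
      PySem.List.pyGetD (PySem.List.pyGetD st.2.1 ni []) nj 0 = 0 ∧
      PySem.List.pyGetD (PySem.List.pyGetD arr ni []) nj 0 =
        PySem.List.pyGetD (PySem.List.pyGetD arr ci []) cj 0 then
    (st.1 ++ [(ni, nj)],
     PySem.List.pySetD st.2.1 ni (PySem.List.pySetD (PySem.List.pyGetD st.2.1 ni []) nj 1),
     PySem.Set.add st.2.2.1 (ni, nj), st.2.2.2 + 1)
  else st

-- A's `while q:` loop (fuel-guarded for totality only: each iteration pops one cell and
-- every enqueue marks a fresh cell of the 5×5 grid visited, so 25 units always suffice)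
def bfsLoop (fuel : Nat) (arr : List (List Int)) (q : List (Int × Int))
    (v : List (List Int)) (sset : PySem.Set (Int × Int)) (cnt : Int) :
    List (List Int) × PySem.Set (Int × Int) × Int :=
  match fuel, q with
  | 0, _ => (v, sset, cnt)
  | _ + 1, [] => (v, sset, cnt)
  | fuel + 1, c :: q =>
    let st := [((-1 : Int), (0 : Int)), (1, 0), (0, -1), (0, 1)].foldl
      (bfsVisit arr c.1 c.2) (q, v, sset, cnt)
    bfsLoop fuel arr st.1 st.2.1 st.2.2.1 st.2.2.2

-- A's bfs; Python mutates v and arr in place, so the port returns (cnt-or-0, v, arr)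
def bfs (arr : List (List Int)) (v : List (List Int)) (si sj clr : Int) :
    Int × List (List Int) × List (List Int) :=
  let q : List (Int × Int) := [] ++ [(si, sj)]
  let v := PySem.List.pySetD v si (PySem.List.pySetD (PySem.List.pyGetD v si []) sj 1)
  let sset := PySem.Set.add PySem.Set.empty (si, sj)
  let cnt : Int := 0 + 1
  let r := bfsLoop 25 arr q v sset cnt
  if 3 ≤ r.2.2 then
    if clr = 1 then
      (r.2.2, r.1, r.2.1.foldl (fun a p =>
        PySem.List.pySetD a p.1 (PySem.List.pySetD (PySem.List.pyGetD a p.1 []) p.2 0)) arr)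
    else (r.2.2, r.1, arr)
  else (0, r.1, arr)

def count_clear (arr : List (List Int)) (clr : Int) : Int :=
  let v : List (List Int) := (PySem.List.pyRange 0 5 1).map (fun _ => List.replicate 5 (0 : Int))
  let st := (PySem.List.pyRange 0 5 1).foldl (fun st i =>
      (PySem.List.pyRange 0 5 1).foldl (fun st j =>
        if PySem.List.pyGetD (PySem.List.pyGetD st.2.1 i []) j 0 = 0 then
          let r := bfs st.1 st.2.1 i j clr
          (r.2.2, r.2.1, st.2.2 + r.1)
        else st) st) (arr, v, (0 : Int))
  st.2.2

-- ===== PORT B =====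
-- one neighbour probe of B's `for ni, nj in ...` loop over the growing worklist
def compVisit (arr : List (List Int)) (ci cj : Int) (cells : List (Int × Int))
    (n : Int × Int) : List (Int × Int) :=
  if (0 ≤ n.1 ∧ n.1 < 5 ∧ 0 ≤ n.2 ∧ n.2 < 5) ∧ ¬ n ∈ cells ∧
      PySem.List.pyGetD (PySem.List.pyGetD arr n.1 []) n.2 0 =
        PySem.List.pyGetD (PySem.List.pyGetD arr ci []) cj 0 then
    cells ++ [n]
  else cells

-- B's `while k < len(cells):` loop (fuel-guarded for totality only: the worklist holds
-- distinct cells of the 5×5 grid, so it never grows past 25 entries)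
def compGo (arr : List (List Int)) (fuel : Nat) (cells : List (Int × Int)) (k : Nat) :
    List (Int × Int) :=
  match fuel with
  | 0 => cells
  | fuel + 1 =>
    if k < cells.length then
      let c := cells.getD k (0, 0)
      let cells := [(c.1 - 1, c.2), (c.1 + 1, c.2), (c.1, c.2 - 1), (c.1, c.2 + 1)].foldl
        (compVisit arr c.1 c.2) cells
      compGo arr fuel cells (k + 1)
    else cells

def comp (arr : List (List Int)) (si sj : Int) : List (Int × Int) :=
  compGo arr 25 [(si, sj)] 0

-- B's in-place clearing loop touches only `arr`, never the returned count, so the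
-- value-level port stops at the total.
def count_clear_alt (arr : List (List Int)) (clr : Int) : Int :=
  let comps := (PySem.List.pyRange 0 5 1).flatMap (fun i =>
    (PySem.List.pyRange 0 5 1).map (fun j => comp arr i j))
  comps.foldl (fun t c => t + (if 3 ≤ c.length then (1 : Int) else 0)) 0

-- ===== PRECONDITION & SPEC =====
-- Pre_ = exactly the inputs where Python A returns: A eventually evaluates arr[i][j] for
-- every 0 ≤ i,j < 5, raising IndexError unless the grid has ≥ 5 rows whose first five rows
-- have ≥ 5 entries each.
def Pre_count_clear (arr : List (List Int)) (clr : Int) : Prop :=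
  5 ≤ arr.length ∧ ∀ r ∈ arr.take 5, 5 ≤ r.length
instance (arr : List (List Int)) (clr : Int) : Decidable (Pre_count_clear arr clr) := by
  unfold Pre_count_clear; infer_instance

def pvWitness_count_clear : List (List Int) × Int :=
  ([[1, 1, 1, 0, 2], [0, 1, 0, 0, 2], [3, 3, 0, 2, 2], [3, 3, 4, 4, 4], [5, 5, 4, 9, 8]], 1)

def Spec_count_clear (arr : List (List Int)) (clr : Int) (out : Int) : Prop :=
  out = count_clear_alt arr clr
instance (arr : List (List Int)) (clr : Int) (out : Int) : Decidable (Spec_count_clear arr clr out) := by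
  unfold Spec_count_clear; infer_instance

-- ===== CLAIM (what is proved, stated in full; the proofs are below) =====
def Claim_equal_count_clear : Prop := ∀ (arr : List (List Int)) (clr : Int),
  Dom_count_clear arr clr → Pre_count_clear arr clr →
  Spec_count_clear arr clr (count_clear arr clr)

-- ===== LEMMAS AND PROOFS =====

-- the 5×5 grid, its cells in A's/B's scan order, geometry
def inGrid (p : Int × Int) : Prop := 0 ≤ p.1 ∧ p.1 < 5 ∧ 0 ≤ p.2 ∧ p.2 < 5

def scanCells : List (Int × Int) :=
  (PySem.List.pyRange 0 5 1).flatMap (fun i => (PySem.List.pyRange 0 5 1).map (fun j => (i, j)))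

def deltas : List (Int × Int) := [(-1, 0), (1, 0), (0, -1), (0, 1)]

def gval (a : List (List Int)) (p : Int × Int) : Int :=
  PySem.List.pyGetD (PySem.List.pyGetD a p.1 []) p.2 0

def adjStep (arr : List (List Int)) (p q : Int × Int) : Prop :=
  inGrid p ∧ inGrid q ∧ (q.1 - p.1, q.2 - p.2) ∈ deltas ∧ gval arr q = gval arr p

def Reach (arr : List (List Int)) : Int × Int → Int × Int → Prop :=
  Relation.ReflTransGen (adjStep arr)

def Shape (a : List (List Int)) : Prop :=
  5 ≤ a.length ∧ ∀ k : Nat, k < 5 → 5 ≤ (a.getD k []).length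

def set2 (a : List (List Int)) (p : Int × Int) (x : Int) : List (List Int) :=
  PySem.List.pySetD a p.1 (PySem.List.pySetD (PySem.List.pyGetD a p.1 []) p.2 x)

def Encodes (v : List (List Int)) (W : List (Int × Int)) : Prop :=
  Shape v ∧ ∀ p : Int × Int, inGrid p → gval v p = (if p ∈ W then 1 else 0)

def Closed (arr : List (List Int)) (V : List (Int × Int)) : Prop :=
  ∀ a ∈ V, ∀ b, adjStep arr a b → b ∈ V

-- S is the component of s in arr's equal-value grid graph, modulo already-visited V
def GoodMod (arr : List (List Int)) (V : List (Int × Int)) (s : Int × Int)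
    (S : List (Int × Int)) : Prop :=
  s ∈ S ∧ S.Nodup ∧ (∀ x ∈ S, inGrid x) ∧ (∀ x ∈ S, x ∉ V) ∧
  (∀ x ∈ S, Reach arr s x) ∧ (∀ x ∈ S, ∀ y, adjStep arr x y → y ∈ V ∨ y ∈ S)

lemma mem_scanCells_iff (p : Int × Int) : p ∈ scanCells ↔ inGrid p := by
  unfold scanCells inGrid
  simp only [List.mem_flatMap, List.mem_map, PySem.List.mem_pyRange_one]
  constructor
  · rintro ⟨i, hi, j, hj, rfl⟩; exact ⟨hi.1, hi.2, hj.1, hj.2⟩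
  · rintro ⟨h1, h2, h3, h4⟩; exact ⟨p.1, ⟨h1, h2⟩, p.2, ⟨h3, h4⟩, rfl⟩

lemma scanCells_nodup : scanCells.Nodup := by
  decide

lemma adjStep_symm (arr : List (List Int)) : Symmetric (adjStep arr) := by
  rintro p q ⟨hp, hq, hd, hv⟩
  refine ⟨hq, hp, ?_, hv.symm⟩
  simp only [deltas, List.mem_cons, List.not_mem_nil, or_false, Prod.mk.injEq,
    Prod.ext_iff] at hd ⊢
  omega

lemma reach_symm (arr : List (List Int)) : Symmetric (Reach arr) :=
  Relation.ReflTransGen.symmetric (adjStep_symm arr)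

lemma adj_delta (arr : List (List Int)) (c y : Int × Int) (h : adjStep arr c y) :
    ∃ d ∈ deltas, y = (c.1 + d.1, c.2 + d.2) := by
  refine ⟨(y.1 - c.1, y.2 - c.2), h.2.2.1, ?_⟩
  rw [Prod.ext_iff]
  constructor <;> simp

lemma closed_mem_of_reach (arr : List (List Int)) (T : List (Int × Int)) (x y : Int × Int)
    (hx : x ∈ T) (hcl : ∀ a ∈ T, ∀ b, adjStep arr a b → b ∈ T) (h : Reach arr x y) : y ∈ T := by
  induction h with
  | refl => exact hx
  | tail _ hstep ih => exact hcl _ ih _ hstep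

lemma goodMod_shift (arr : List (List Int)) (V : List (Int × Int)) (s x : Int × Int)
    (S : List (Int × Int)) (h : GoodMod arr V s S) (hx : x ∈ S) : GoodMod arr V x S := by
  obtain ⟨hs, hnd, hg, hnv, hr, hcl⟩ := h
  exact ⟨hx, hnd, hg, hnv, fun y hy => (reach_symm arr (hr x hx)).trans (hr y hy), hcl⟩

lemma goodMod_ext (arr : List (List Int)) (V : List (Int × Int)) (s : Int × Int)
    (S T : List (Int × Int)) (hV : Closed arr V) (hS : GoodMod arr V s S)
    (hT : GoodMod arr [] s T) : ∀ y, (y ∈ S ↔ y ∈ T) := by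
  intro y
  constructor
  · intro hy
    exact closed_mem_of_reach arr T s y hT.1
      (fun a ha b hb => (hT.2.2.2.2.2 a ha b hb).resolve_left (by simp)) (hS.2.2.2.2.1 y hy)
  · intro hy
    have hreach : Reach arr s y := hT.2.2.2.2.1 y hy
    clear hy
    induction hreach with
    | refl => exact hS.1
    | tail hr hstep ih =>
      rcases hS.2.2.2.2.2 _ ih _ hstep with hcV | hIn
      · exact absurd (hV _ hcV _ (adjStep_symm arr hstep)) (hS.2.2.2.1 _ ih)
      · exact hIn

lemma goodMod_length_eq (arr : List (List Int)) (V : List (Int × Int)) (s : Int × Int)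
    (S T : List (Int × Int)) (hV : Closed arr V) (hS : GoodMod arr V s S)
    (hT : GoodMod arr [] s T) : S.length = T.length := by
  exact ((List.perm_ext_iff_of_nodup hS.2.1 hT.2.1).2 (goodMod_ext arr V s S T hV hS hT)).length_eq

lemma nodup_grid_length_le (S : List (Int × Int)) (hnd : S.Nodup)
    (hg : ∀ x ∈ S, inGrid x) : S.length ≤ 25 := by
  have hsub : S ⊆ scanCells := fun x hx => (mem_scanCells_iff x).2 (hg x hx)
  have := (List.subperm_of_subset hnd hsub).length_le
  simpa [scanCells] using this

-- reading / writing the 5×5 window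
lemma getD_set_self {α : Type} (l : List α) (i : Nat) (h : i < l.length) (v d : α) :
    (l.set i v).getD i d = v := by
  rw [List.getD_eq_getElem _ _ (by simpa using h)]; simp

lemma getD_set_ne {α : Type} (l : List α) (i j : Nat) (h : i ≠ j) (v : α) (d : α) :
    (l.set i v).getD j d = l.getD j d := by
  unfold List.getD
  rw [List.getElem?_set_ne h]

lemma gval_set2 (a : List (List Int)) (ha : Shape a) (p : Int × Int) (hp : inGrid p)
    (x : Int) (q : Int × Int) (hq : inGrid q) :
    gval (set2 a p x) q = if q = p then x else gval a q := by
  obtain ⟨hp1, hp2, hp3, hp4⟩ := hp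
  obtain ⟨hq1, hq2, hq3, hq4⟩ := hq
  obtain ⟨hal, har⟩ := ha
  have e1 : p.1 = ((p.1.toNat : Nat) : Int) := (Int.toNat_of_nonneg hp1).symm
  have e2 : p.2 = ((p.2.toNat : Nat) : Int) := (Int.toNat_of_nonneg hp3).symm
  have e3 : q.1 = ((q.1.toNat : Nat) : Int) := (Int.toNat_of_nonneg hq1).symm
  have e4 : q.2 = ((q.2.toNat : Nat) : Int) := (Int.toNat_of_nonneg hq3).symm
  unfold gval set2
  rw [e1, e2, e3, e4]
  simp only [PySem.List.pySetD_natCast, PySem.List.pyGetD_natCast]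
  by_cases h1 : q.1 = p.1
  · have hn1 : q.1.toNat = p.1.toNat := by omega
    rw [hn1, getD_set_self _ _ (by omega) _ _]
    by_cases h2 : q.2 = p.2
    · have hqp : q = p := Prod.ext_iff.2 ⟨h1, h2⟩
      have hn2 : q.2.toNat = p.2.toNat := by omega
      rw [hn2, getD_set_self _ _ (by have := har p.1.toNat (by omega); omega) _ _, if_pos hqp]
    · have hqp : q ≠ p := fun h => h2 (by rw [h])
      rw [getD_set_ne _ _ _ (by omega) _ _, if_neg hqp]
  · have hqp : q ≠ p := fun h => h1 (by rw [h])
    rw [getD_set_ne _ _ _ (by omega) _ _, if_neg hqp]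

lemma shape_set2 (a : List (List Int)) (ha : Shape a) (p : Int × Int) (hp : inGrid p)
    (x : Int) : Shape (set2 a p x) := by
  obtain ⟨hp1, hp2, hp3, hp4⟩ := hp
  obtain ⟨hal, har⟩ := ha
  unfold Shape set2
  rw [PySem.List.pySetD_of_nonneg _ _ hp1]
  refine ⟨by simpa using hal, fun k hk => ?_⟩
  by_cases h1 : k = p.1.toNat
  · subst h1
    rw [getD_set_self _ _ (by omega) _ _, PySem.List.pySetD_of_nonneg _ _ hp3]
    have e1 : p.1 = ((p.1.toNat : Nat) : Int) := (Int.toNat_of_nonneg hp1).symm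
    rw [e1, PySem.List.pyGetD_natCast]
    simpa using har p.1.toNat (by omega)
  · rw [getD_set_ne _ _ _ (fun h => h1 h.symm) _ _]
    exact har k hk

lemma encodes_snoc (v : List (List Int)) (W : List (Int × Int)) (h : Encodes v W)
    (p : Int × Int) (hp : inGrid p) : Encodes (set2 v p 1) (W ++ [p]) := by
  obtain ⟨hsh, hval⟩ := h
  refine ⟨shape_set2 v hsh p hp 1, fun q hq => ?_⟩
  rw [gval_set2 v hsh p hp 1 q hq]
  by_cases hqp : q = p
  · simp [hqp]
  · rw [if_neg hqp, hval q hq]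
    simp [hqp]

lemma encodes_init : Encodes ((PySem.List.pyRange 0 5 1).map (fun _ => List.replicate 5 (0 : Int))) [] := by
  refine ⟨⟨by decide, fun k hk => ?_⟩, fun p hp => ?_⟩
  · interval_cases k <;> decide
  obtain ⟨i, j⟩ := p
  obtain ⟨h1, h2, h3, h4⟩ := hp
  simp only [List.not_mem_nil, if_false]
  interval_cases i <;> interval_cases j <;> decide

lemma shape_of_pre (arr : List (List Int)) (h : 5 ≤ arr.length ∧ ∀ r ∈ arr.take 5, 5 ≤ r.length) :
    Shape arr := by
  obtain ⟨hl, hr⟩ := h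
  refine ⟨hl, fun k hk => ?_⟩
  have hk' : k < arr.length := by omega
  rw [List.getD_eq_getElem _ _ hk']
  exact hr _ (by
    have : arr[k] = (arr.take 5)[k]'(by simp; omega) := (List.getElem_take).symm
    rw [this]
    exact List.getElem_mem _)

-- ===== B's closure loop computes the component =====

def CompInv (arr : List (List Int)) (s : Int × Int) (cells : List (Int × Int)) (k : Nat) : Prop :=
  s ∈ cells ∧ cells.Nodup ∧ (∀ x ∈ cells, inGrid x) ∧ (∀ x ∈ cells, Reach arr s x) ∧
  (∀ m : Nat, m < k → m < cells.length →
    ∀ y, adjStep arr (cells.getD m (0, 0)) y → y ∈ cells)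

lemma compInv_closed (arr : List (List Int)) (s : Int × Int) (cells : List (Int × Int))
    (k : Nat) (h : CompInv arr s cells k) (hk : cells.length ≤ k) :
    GoodMod arr [] s cells := by
  obtain ⟨hs, hnd, hg, hr, hcl⟩ := h
  refine ⟨hs, hnd, hg, fun x _ => List.not_mem_nil, hr, fun x hx y hy => Or.inr ?_⟩
  obtain ⟨m, hm, rfl⟩ := List.mem_iff_getElem.1 hx
  have hgd : cells.getD m (0, 0) = cells[m] := List.getD_eq_getElem _ _ hm
  exact hcl m (by omega) hm y (hgd ▸ hy)

lemma compVisit_step (arr : List (List Int)) (s c n : Int × Int) (cells : List (Int × Int))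
    (k : Nat) (hk : k ≤ cells.length) (hc : c ∈ cells) (hcr : Reach arr s c)
    (hInv : CompInv arr s cells k) (hn : (n.1 - c.1, n.2 - c.2) ∈ deltas) :
    CompInv arr s (compVisit arr c.1 c.2 cells n) k ∧
    (∀ x ∈ cells, x ∈ compVisit arr c.1 c.2 cells n) ∧
    (∀ m : Nat, m < cells.length →
      (compVisit arr c.1 c.2 cells n).getD m (0, 0) = cells.getD m (0, 0)) ∧
    cells.length ≤ (compVisit arr c.1 c.2 cells n).length ∧
    (adjStep arr c n → n ∈ compVisit arr c.1 c.2 cells n) := by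
  obtain ⟨hs, hnd, hg, hr, hcl⟩ := hInv
  unfold compVisit
  split_ifs with hcond
  · obtain ⟨hb, hmem, hval⟩ := hcond
    have hadj : adjStep arr c n := ⟨hg c hc, hb, hn, hval⟩
    refine ⟨⟨List.mem_append_left _ hs, ?_, ?_, ?_, ?_⟩,
      fun x hx => List.mem_append_left _ hx,
      fun m hm => List.getD_append _ _ _ _ hm, by simp,
      fun _ => List.mem_append_right _ (by simp)⟩
    · rw [List.nodup_append]
      exact ⟨hnd, by simp, fun a ha b hb hab => by
        simp only [List.mem_singleton] at hb
        subst hb; exact hmem (hab ▸ ha)⟩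
    · intro x hx
      rcases List.mem_append.1 hx with h | h
      · exact hg x h
      · simp at h; subst h; exact hb
    · intro x hx
      rcases List.mem_append.1 hx with h | h
      · exact hr x h
      · simp at h; subst h; exact hcr.tail hadj
    · intro m hmk hml y hy
      have hml' : m < cells.length := by omega
      rw [List.getD_append _ _ _ _ hml'] at hy
      exact List.mem_append_left _ (hcl m hmk hml' y hy)
  · refine ⟨⟨hs, hnd, hg, hr, hcl⟩, fun x hx => hx, fun m _ => rfl, le_refl _, fun hadj => ?_⟩
    by_cases hmem : n ∈ cells
    · exact hmem
    · exact absurd ⟨hadj.2.1, hmem, hadj.2.2.2⟩ hcond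

lemma compGo_good (arr : List (List Int)) (s : Int × Int) :
    ∀ (fuel : Nat) (cells : List (Int × Int)) (k : Nat), CompInv arr s cells k →
      25 ≤ fuel + k → GoodMod arr [] s (compGo arr fuel cells k) := by
  intro fuel
  induction fuel with
  | zero =>
    intro cells k hInv hf
    have hlen : cells.length ≤ 25 := nodup_grid_length_le cells hInv.2.1 hInv.2.2.1
    exact compInv_closed arr s cells k hInv (by omega)
  | succ fuel ih =>
    intro cells k hInv hf
    by_cases hk : k < cells.length
    · have hc : cells.getD k (0, 0) ∈ cells := by
        rw [List.getD_eq_getElem _ _ hk]; exact List.getElem_mem _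
      set c := cells.getD k (0, 0) with hcdef
      have hcr : Reach arr s c := hInv.2.2.2.1 c hc
      obtain ⟨I1, M1, P1, L1, D1⟩ := compVisit_step arr s c (c.1 - 1, c.2) cells k
        (by omega) hc hcr hInv (by simp [deltas, Prod.ext_iff]; try omega)
      set cs1 := compVisit arr c.1 c.2 cells (c.1 - 1, c.2) with h1def
      obtain ⟨I2, M2, P2, L2, D2⟩ := compVisit_step arr s c (c.1 + 1, c.2) cs1 k
        (by omega) (M1 c hc) hcr I1 (by simp [deltas, Prod.ext_iff]; try omega)
      set cs2 := compVisit arr c.1 c.2 cs1 (c.1 + 1, c.2) with h2def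
      obtain ⟨I3, M3, P3, L3, D3⟩ := compVisit_step arr s c (c.1, c.2 - 1) cs2 k
        (by omega) (M2 c (M1 c hc)) hcr I2 (by simp [deltas, Prod.ext_iff]; try omega)
      set cs3 := compVisit arr c.1 c.2 cs2 (c.1, c.2 - 1) with h3def
      obtain ⟨I4, M4, P4, L4, D4⟩ := compVisit_step arr s c (c.1, c.2 + 1) cs3 k
        (by omega) (M3 c (M2 c (M1 c hc))) hcr I3 (by simp [deltas, Prod.ext_iff]; try omega)
      set cs4 := compVisit arr c.1 c.2 cs3 (c.1, c.2 + 1) with h4def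
      have hmono : ∀ x ∈ cs1, x ∈ cs4 := fun x hx => M4 x (M3 x (M2 x hx))
      have hInv' : CompInv arr s cs4 (k + 1) := by
        obtain ⟨hs4, hnd4, hg4, hr4, hcl4⟩ := I4
        refine ⟨hs4, hnd4, hg4, hr4, fun m hm hml y hy => ?_⟩
        rcases Nat.lt_succ_iff_lt_or_eq.1 hm with hm' | rfl
        · exact hcl4 m hm' hml y hy
        · have hgd : cs4.getD m (0, 0) = c := by
            rw [P4 m (by omega), P3 m (by omega), P2 m (by omega), P1 m (by omega)]
          rw [hgd] at hy
          obtain ⟨d, hd, rfl⟩ := adj_delta arr c y hy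
          simp only [deltas, List.mem_cons, List.not_mem_nil, or_false] at hd
          rcases hd with rfl | rfl | rfl | rfl
          · have he : (c.1 + (-1 : Int), c.2 + (0 : Int)) = (c.1 - 1, c.2) := by
              simp [Prod.ext_iff]; omega
            rw [he] at hy ⊢
            exact hmono _ (D1 hy)
          · have he : (c.1 + (1 : Int), c.2 + (0 : Int)) = (c.1 + 1, c.2) := by
              simp [Prod.ext_iff]
            rw [he] at hy ⊢
            exact M4 _ (M3 _ (D2 hy))
          · have he : (c.1 + (0 : Int), c.2 + (-1 : Int)) = (c.1, c.2 - 1) := by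
              simp [Prod.ext_iff]; omega
            rw [he] at hy ⊢
            exact M4 _ (D3 hy)
          · have he : (c.1 + (0 : Int), c.2 + (1 : Int)) = (c.1, c.2 + 1) := by
              simp [Prod.ext_iff]
            rw [he] at hy ⊢
            exact D4 hy
      have hstep : compGo arr (fuel + 1) cells k = compGo arr fuel cs4 (k + 1) := by
        rw [compGo, if_pos hk]; rfl
      rw [hstep]
      exact ih cs4 (k + 1) hInv' (by omega)
    · have hstep : compGo arr (fuel + 1) cells k = cells := by
        rw [compGo, if_neg hk]
      rw [hstep]
      exact compInv_closed arr s cells k hInv (by omega)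

lemma comp_good (arr : List (List Int)) (s : Int × Int) (hs : inGrid s) :
    GoodMod arr [] s (comp arr s.1 s.2) := by
  unfold comp
  refine compGo_good arr s 25 [(s.1, s.2)] 0 ⟨by simp, by simp, ?_, ?_, by omega⟩ (by omega)
  · intro x hx; simp at hx; subst hx; simpa using hs
  · intro x hx; simp at hx; subst hx
    exact Relation.ReflTransGen.refl

-- ===== A's bfs loop computes the component modulo the visited set =====

def BfsInv (arr0 : List (List Int)) (V : List (Int × Int)) (s : Int × Int)
    (pend : List (Int × Int)) (q : List (Int × Int)) (v : List (List Int))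
    (S : List (Int × Int)) (cnt : Int) : Prop :=
  Encodes v (V ++ S) ∧ S.Nodup ∧ (∀ x ∈ S, inGrid x) ∧ (∀ x ∈ S, x ∉ V) ∧ s ∈ S ∧
  (∀ x ∈ S, Reach arr0 s x) ∧ (∀ x ∈ q, x ∈ S) ∧
  (∀ x ∈ S, x ∉ q → x ∉ pend → ∀ y, adjStep arr0 x y → y ∈ V ∨ y ∈ S) ∧
  cnt = (S.length : Int)

set_option maxHeartbeats 1000000 in
lemma bfsVisit_step (arr0 arr : List (List Int)) (V : List (Int × Int))
    (harr : ∀ p, inGrid p → p ∉ V → gval arr p = gval arr0 p)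
    (s c : Int × Int) (pend : List (Int × Int))
    (q : List (Int × Int)) (v : List (List Int)) (S : List (Int × Int)) (cnt : Int)
    (hc : c ∈ S) (hInv : BfsInv arr0 V s pend q v S cnt) (d : Int × Int) (hd : d ∈ deltas) :
    BfsInv arr0 V s pend (bfsVisit arr c.1 c.2 (q, v, S, cnt) d).1
      (bfsVisit arr c.1 c.2 (q, v, S, cnt) d).2.1
      (bfsVisit arr c.1 c.2 (q, v, S, cnt) d).2.2.1
      (bfsVisit arr c.1 c.2 (q, v, S, cnt) d).2.2.2 ∧
    (bfsVisit arr c.1 c.2 (q, v, S, cnt) d).1.length + S.length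
      = q.length + (bfsVisit arr c.1 c.2 (q, v, S, cnt) d).2.2.1.length ∧
    (∀ x ∈ S, x ∈ (bfsVisit arr c.1 c.2 (q, v, S, cnt) d).2.2.1) ∧
    (∀ x ∈ q, x ∈ (bfsVisit arr c.1 c.2 (q, v, S, cnt) d).1) ∧
    (adjStep arr0 c (c.1 + d.1, c.2 + d.2) →
      (c.1 + d.1, c.2 + d.2) ∈ V ∨ (c.1 + d.1, c.2 + d.2) ∈ (bfsVisit arr c.1 c.2 (q, v, S, cnt) d).2.2.1) := by
  obtain ⟨henc, hnd, hg, hnv, hsS, hre, hqS, hcl, hcnt⟩ := hInv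
  have hcg : inGrid c := hg c hc
  have hcV : c ∉ V := hnv c hc
  unfold bfsVisit
  dsimp only
  split_ifs with hcond
  · obtain ⟨hb, hv0, hval⟩ := hcond
    have hgn : inGrid (c.1 + d.1, c.2 + d.2) := hb
    have hnmem : (c.1 + d.1, c.2 + d.2) ∉ V ++ S := by
      intro hmem
      have h0 : gval v (c.1 + d.1, c.2 + d.2) = 1 := by
        rw [henc.2 _ hgn, if_pos hmem]
      have h1 : gval v (c.1 + d.1, c.2 + d.2) = 0 := hv0
      omega
    have hnV : (c.1 + d.1, c.2 + d.2) ∉ V := fun h => hnmem (List.mem_append_left _ h)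
    have hnS : (c.1 + d.1, c.2 + d.2) ∉ S := fun h => hnmem (List.mem_append_right _ h)
    have hadj : adjStep arr0 c (c.1 + d.1, c.2 + d.2) := by
      refine ⟨hcg, hgn, by simpa using hd, ?_⟩
      rw [← harr _ hgn hnV, ← harr _ hcg hcV]
      exact hval
    have haddeq : PySem.Set.add S (c.1 + d.1, c.2 + d.2) = S ++ [(c.1 + d.1, c.2 + d.2)] := by
      simp [PySem.Set.add, hnS]
    rw [haddeq]
    refine ⟨⟨?_, ?_, ?_, ?_, List.mem_append_left _ hsS, ?_, ?_, ?_, ?_⟩,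
      by simp only [List.length_append, List.length_singleton]; omega, 
      fun x hx => List.mem_append_left _ hx, fun x hx => List.mem_append_left _ hx,
      fun _ => Or.inr (List.mem_append_right _ (by simp))⟩
    · rw [← List.append_assoc]
      exact encodes_snoc v (V ++ S) henc _ hgn
    · rw [List.nodup_append]
      exact ⟨hnd, by simp, fun a ha b hb hab => by
        simp only [List.mem_singleton] at hb
        subst hb; exact hnS (hab ▸ ha)⟩
    · intro x hx
      rcases List.mem_append.1 hx with h | h
      · exact hg x h
      · simp at h; subst h; exact hgn
    · intro x hx
      rcases List.mem_append.1 hx with h | h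
      · exact hnv x h
      · simp at h; subst h; exact hnV
    · intro x hx
      rcases List.mem_append.1 hx with h | h
      · exact hre x h
      · simp at h; subst h; exact (hre c hc).tail hadj
    · intro x hx
      rcases List.mem_append.1 hx with h | h
      · exact List.mem_append_left _ (hqS x h)
      · exact List.mem_append_right _ h
    · intro x hx hxq hxp y hy
      have hxn : x ≠ (c.1 + d.1, c.2 + d.2) := fun h =>
        hxq (h ▸ List.mem_append_right _ (by simp))
      have hxS : x ∈ S := by
        rcases List.mem_append.1 hx with h | h
        · exact h
        · simp at h; exact absurd h hxn
      have hxq' : x ∉ q := fun h => hxq (List.mem_append_left _ h)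
      exact (hcl x hxS hxq' hxp y hy).imp id (List.mem_append_left _)
    · simp only [List.length_append, List.length_singleton]
      push_cast
      omega
  · refine ⟨⟨henc, hnd, hg, hnv, hsS, hre, hqS, hcl, hcnt⟩, by rfl,
      fun x hx => hx, fun x hx => hx, fun hadj => ?_⟩
    by_cases hmem : (c.1 + d.1, c.2 + d.2) ∈ V ++ S
    · exact (List.mem_append.1 hmem)
    · exfalso
      apply hcond
      refine ⟨hadj.2.1, ?_, ?_⟩
      · have := henc.2 _ hadj.2.1
        rw [if_neg hmem] at this
        exact this
      · have hnV : (c.1 + d.1, c.2 + d.2) ∉ V := fun h => hmem (List.mem_append_left _ h)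
        have h2 := hadj.2.2.2
        rw [← harr _ hadj.2.1 hnV, ← harr _ hcg hcV] at h2
        exact h2

set_option maxHeartbeats 1000000 in
lemma bfsLoop_good (arr0 arr : List (List Int)) (V : List (Int × Int))
    (hVnd : V.Nodup) (hVg : ∀ x ∈ V, inGrid x)
    (harr : ∀ p, inGrid p → p ∉ V → gval arr p = gval arr0 p) (s : Int × Int) :
    ∀ (fuel : Nat) (q : List (Int × Int)) (v : List (List Int)) (S : List (Int × Int)) (cnt : Int),
      BfsInv arr0 V s [] q v S cnt →
      q.length + (25 - (V ++ S).length) ≤ fuel →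
      ∃ v' S', bfsLoop fuel arr q v S cnt = (v', S', (S'.length : Int)) ∧
        Encodes v' (V ++ S') ∧ GoodMod arr0 V s S' := by
  intro fuel
  induction fuel with
  | zero =>
    intro q v S cnt hInv hf
    have hq : q = [] := by
      cases q with
      | nil => rfl
      | cons a q => simp at hf
    subst hq
    obtain ⟨henc, hnd, hg, hnv, hsS, hre, _, hcl, hcnt⟩ := hInv
    exact ⟨v, S, by rw [hcnt]; rfl, henc,
      ⟨hsS, hnd, hg, hnv, hre, fun x hx y hy =>
        hcl x hx (List.not_mem_nil) (List.not_mem_nil) y hy⟩⟩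
  | succ fuel ih =>
    intro q v S cnt hInv hf
    cases q with
    | nil =>
      obtain ⟨henc, hnd, hg, hnv, hsS, hre, _, hcl, hcnt⟩ := hInv
      exact ⟨v, S, by rw [hcnt]; rfl, henc,
        ⟨hsS, hnd, hg, hnv, hre, fun x hx y hy =>
          hcl x hx (List.not_mem_nil) (List.not_mem_nil) y hy⟩⟩
    | cons c rest =>
      have hc : c ∈ S := hInv.2.2.2.2.2.2.1 c (by simp)
      have hInv1 : BfsInv arr0 V s [c] rest v S cnt := by
        obtain ⟨henc, hnd, hg, hnv, hsS, hre, hqS, hcl, hcnt⟩ := hInv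
        refine ⟨henc, hnd, hg, hnv, hsS, hre, fun x hx => hqS x (by simp [hx]), ?_, hcnt⟩
        intro x hx hxq hxp y hy
        refine hcl x hx ?_ (List.not_mem_nil) y hy
        simp only [List.mem_cons]
        push_neg
        exact ⟨fun h => hxp (by simp [h]), hxq⟩
      obtain ⟨I1, L1, M1, Q1, D1⟩ := bfsVisit_step arr0 arr V harr s c [c] rest v S cnt
        hc hInv1 (-1, 0) (by simp [deltas])
      set t1 := bfsVisit arr c.1 c.2 (rest, v, S, cnt) (-1, 0) with h1def
      obtain ⟨I2, L2, M2, Q2, D2⟩ := bfsVisit_step arr0 arr V harr s c [c] t1.1 t1.2.1 t1.2.2.1 t1.2.2.2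
        (M1 c hc) I1 (1, 0) (by simp [deltas])
      set t2 := bfsVisit arr c.1 c.2 (t1.1, t1.2.1, t1.2.2.1, t1.2.2.2) (1, 0) with h2def
      obtain ⟨I3, L3, M3, Q3, D3⟩ := bfsVisit_step arr0 arr V harr s c [c] t2.1 t2.2.1 t2.2.2.1 t2.2.2.2
        (M2 c (M1 c hc)) I2 (0, -1) (by simp [deltas])
      set t3 := bfsVisit arr c.1 c.2 (t2.1, t2.2.1, t2.2.2.1, t2.2.2.2) (0, -1) with h3def
      obtain ⟨I4, L4, M4, Q4, D4⟩ := bfsVisit_step arr0 arr V harr s c [c] t3.1 t3.2.1 t3.2.2.1 t3.2.2.2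
        (M3 c (M2 c (M1 c hc))) I3 (0, 1) (by simp [deltas])
      set t4 := bfsVisit arr c.1 c.2 (t3.1, t3.2.1, t3.2.2.1, t3.2.2.2) (0, 1) with h4def
      have hInv4 : BfsInv arr0 V s [] t4.1 t4.2.1 t4.2.2.1 t4.2.2.2 := by
        obtain ⟨henc, hnd, hg, hnv, hsS, hre, hqS, hcl, hcnt⟩ := I4
        refine ⟨henc, hnd, hg, hnv, hsS, hre, hqS, ?_, hcnt⟩
        intro x hx hxq _ y hy
        by_cases hxc : x = c
        · subst hxc
          obtain ⟨d, hd, rfl⟩ := adj_delta arr0 x y hy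
          simp only [deltas, List.mem_cons, List.not_mem_nil, or_false] at hd
          rcases hd with rfl | rfl | rfl | rfl
          · exact (D1 hy).imp id (fun h => M4 _ (M3 _ (M2 _ h)))
          · exact (D2 hy).imp id (fun h => M4 _ (M3 _ h))
          · exact (D3 hy).imp id (fun h => M4 _ h)
          · exact D4 hy
        · exact hcl x hx hxq (by simp [hxc]) y hy
      have hstep : bfsLoop (fuel + 1) arr (c :: rest) v S cnt
          = bfsLoop fuel arr t4.1 t4.2.1 t4.2.2.1 t4.2.2.2 := by
        rw [bfsLoop]; rfl
      obtain ⟨v', S', heq, henc', hgood⟩ := ih t4.1 t4.2.1 t4.2.2.1 t4.2.2.2 hInv4 (by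
        simp only [List.length_append] at hf ⊢
        have hle : (V ++ t4.2.2.1).length ≤ 25 := by
          refine nodup_grid_length_le _ ?_ ?_
          · rw [List.nodup_append]
            exact ⟨hVnd, hInv4.2.1, fun a ha b hb hab =>
              hInv4.2.2.2.1 b hb (hab ▸ ha)⟩
          · intro x hx
            rcases List.mem_append.1 hx with h | h
            · exact hVg x h
            · exact hInv4.2.2.1 x h
        simp only [List.length_append] at hle
        simp at hf
        omega)
      exact ⟨v', S', hstep ▸ heq, henc', hgood⟩

lemma clear_fold (S : List (Int × Int)) (hg : ∀ x ∈ S, inGrid x) :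
    ∀ (arr : List (List Int)), Shape arr →
      Shape (S.foldl (fun a p =>
        PySem.List.pySetD a p.1 (PySem.List.pySetD (PySem.List.pyGetD a p.1 []) p.2 0)) arr) ∧
      ∀ p, inGrid p → p ∉ S →
        gval (S.foldl (fun a p =>
          PySem.List.pySetD a p.1 (PySem.List.pySetD (PySem.List.pyGetD a p.1 []) p.2 0)) arr) p
          = gval arr p := by
  induction S with
  | nil => exact fun arr h => ⟨h, fun p _ _ => rfl⟩
  | cons q S' ih =>
    intro arr hsh
    have hqg : inGrid q := hg q (by simp)
    have hg' : ∀ x ∈ S', inGrid x := fun x hx => hg x (by simp [hx])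
    have hsh1 : Shape (set2 arr q 0) := shape_set2 arr hsh q hqg 0
    obtain ⟨hfin, hval⟩ := ih hg' (set2 arr q 0) hsh1
    refine ⟨hfin, fun p hp hpS => ?_⟩
    have hpq : p ≠ q := fun h => hpS (by simp [h])
    have hpS' : p ∉ S' := fun h => hpS (by simp [h])
    rw [List.foldl_cons]
    have : gval (set2 arr q 0) p = gval arr p := by
      rw [gval_set2 arr hsh q hqg 0 p hp, if_neg hpq]
    rw [← this]
    exact hval p hp hpS'

lemma bfs_good (arr0 arr : List (List Int)) (V : List (Int × Int)) (v : List (List Int))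
    (hVnd : V.Nodup) (hVg : ∀ x ∈ V, inGrid x)
    (harr : ∀ p, inGrid p → p ∉ V → gval arr p = gval arr0 p) (hsh : Shape arr)
    (henc : Encodes v V) (p : Int × Int) (hp : inGrid p) (hpV : p ∉ V) (clr : Int) :
    ∃ S, GoodMod arr0 V p S ∧
      (bfs arr v p.1 p.2 clr).1 = (if 3 ≤ S.length then (S.length : Int) else 0) ∧
      Encodes (bfs arr v p.1 p.2 clr).2.1 (V ++ S) ∧
      Shape (bfs arr v p.1 p.2 clr).2.2 ∧
      (∀ x, inGrid x → x ∉ V ++ S → gval (bfs arr v p.1 p.2 clr).2.2 x = gval arr0 x) := by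
  have hSadd : PySem.Set.add PySem.Set.empty ((p.1, p.2) : Int × Int) = [(p.1, p.2)] := rfl
  have hinv : BfsInv arr0 V p [] ([] ++ [(p.1, p.2)])
      (PySem.List.pySetD v p.1 (PySem.List.pySetD (PySem.List.pyGetD v p.1 []) p.2 1))
      (PySem.Set.add PySem.Set.empty (p.1, p.2)) (0 + 1) := by
    rw [hSadd]
    refine ⟨?_, by simp, ?_, ?_, by simp, ?_, fun x hx => hx, ?_, by simp⟩
    · exact encodes_snoc v V henc p hp
    · intro x hx; simp at hx; subst hx; exact hp
    · intro x hx; simp at hx; subst hx; exact hpV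
    · intro x hx; simp at hx; subst hx; exact Relation.ReflTransGen.refl
    · intro x hx hxq _ y hy
      simp at hx hxq
      exact absurd hx hxq
  obtain ⟨v', S', heq, henc', hgood⟩ := bfsLoop_good arr0 arr V hVnd hVg harr p 25
    ([] ++ [(p.1, p.2)])
    (PySem.List.pySetD v p.1 (PySem.List.pySetD (PySem.List.pyGetD v p.1 []) p.2 1))
    (PySem.Set.add PySem.Set.empty (p.1, p.2)) (0 + 1)
    hinv (by simp [List.length_append]; omega)
  refine ⟨S', hgood, ?_⟩
  unfold bfs
  dsimp only
  rw [heq]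
  dsimp only
  have hcast : ((3 : Int) ≤ (S'.length : Int)) ↔ 3 ≤ S'.length := by exact_mod_cast Iff.rfl
  by_cases h3 : 3 ≤ S'.length
  · rw [if_pos (hcast.2 h3), if_pos h3]
    by_cases hclr : clr = 1
    · rw [if_pos hclr]
      obtain ⟨hshc, hagree⟩ := clear_fold S' (fun x hx => hgood.2.2.1 x hx) arr hsh
      refine ⟨rfl, henc', hshc, fun x hxg hxVS => ?_⟩
      have hxS : x ∉ S' := fun h => hxVS (List.mem_append_right _ h)
      have hxV : x ∉ V := fun h => hxVS (List.mem_append_left _ h)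
      rw [hagree x hxg hxS]
      exact harr x hxg hxV
    · rw [if_neg hclr]
      exact ⟨rfl, henc', hsh, fun x hxg hxVS =>
        harr x hxg (fun h => hxVS (List.mem_append_left _ h))⟩
  · rw [if_neg (fun h => h3 (hcast.1 h)), if_neg h3]
    exact ⟨rfl, henc', hsh, fun x hxg hxVS =>
      harr x hxg (fun h => hxVS (List.mem_append_left _ h))⟩

-- ===== outer scan =====

def bigC (arr0 : List (List Int)) (x : Int × Int) : Bool :=
  decide (3 ≤ (comp arr0 x.1 x.2).length)

def aStep (clr : Int) (st : List (List Int) × List (List Int) × Int) (p : Int × Int) :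
    List (List Int) × List (List Int) × Int :=
  if PySem.List.pyGetD (PySem.List.pyGetD st.2.1 p.1 []) p.2 0 = 0 then
    let r := bfs st.1 st.2.1 p.1 p.2 clr
    (r.2.2, r.2.1, st.2.2 + r.1)
  else st

def OuterInv (arr0 : List (List Int)) (V : List (Int × Int))
    (st : List (List Int) × List (List Int) × Int) : Prop :=
  V.Nodup ∧ (∀ x ∈ V, inGrid x) ∧ Closed arr0 V ∧ Encodes st.2.1 V ∧ Shape st.1 ∧
  (∀ p, inGrid p → p ∉ V → gval st.1 p = gval arr0 p) ∧
  st.2.2 = ((V.filter (bigC arr0)).length : Int)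

lemma filter_bigC (arr0 : List (List Int)) (V : List (Int × Int)) (hV : Closed arr0 V)
    (s : Int × Int) (S : List (Int × Int)) (hS : GoodMod arr0 V s S) :
    ((S.filter (bigC arr0)).length : Int) = (if 3 ≤ S.length then (S.length : Int) else 0) := by
  have hkey : ∀ x ∈ S, (comp arr0 x.1 x.2).length = S.length := fun x hx =>
    (goodMod_length_eq arr0 V x S (comp arr0 x.1 x.2) hV
      (goodMod_shift arr0 V s x S hS hx) (comp_good arr0 x (hS.2.2.1 x hx))).symm
  by_cases h3 : 3 ≤ S.length
  · have : S.filter (bigC arr0) = S := List.filter_eq_self.2 (fun x hx =>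
      by
      unfold bigC
      simp only [decide_eq_true_eq]
      rw [hkey x hx]
      exact h3)
    rw [this, if_pos h3]
  · have : S.filter (bigC arr0) = [] := List.filter_eq_nil_iff.2 (fun x hx => by
      unfold bigC
      simp only [decide_eq_true_eq, decide_eq_false_iff_not]
      rw [hkey x hx]
      exact h3)
    rw [this, if_neg h3]
    rfl

lemma outer_fold (arr0 : List (List Int)) (clr : Int) :
    ∀ (todo : List (Int × Int)) (st : List (List Int) × List (List Int) × Int)
      (V : List (Int × Int)), (∀ p ∈ todo, inGrid p) → OuterInv arr0 V st →
      ∃ V', OuterInv arr0 V' (todo.foldl (aStep clr) st) ∧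
        (∀ x ∈ V, x ∈ V') ∧ (∀ p ∈ todo, p ∈ V') := by
  intro todo
  induction todo with
  | nil => exact fun st V _ hInv => ⟨V, hInv, fun x hx => hx, by simp⟩
  | cons p rest ih =>
    intro st V hg hInv
    obtain ⟨hVnd, hVg, hVcl, henc, hsh, harr, hcnt⟩ := hInv
    have hp : inGrid p := hg p (by simp)
    rw [List.foldl_cons]
    by_cases hpV : p ∈ V
    · have hstep : aStep clr st p = st := by
        unfold aStep
        rw [if_neg ?_]
        have h1 := henc.2 p hp
        rw [if_pos hpV] at h1
        intro h0
        have h0' : gval st.2.1 p = 0 := h0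
        omega
      rw [hstep]
      obtain ⟨V', hI, hmono, hall⟩ := ih st V (fun q hq => hg q (by simp [hq]))
        ⟨hVnd, hVg, hVcl, henc, hsh, harr, hcnt⟩
      refine ⟨V', hI, hmono, fun q hq => ?_⟩
      rcases List.mem_cons.1 hq with rfl | hq'
      · exact hmono q hpV
      · exact hall q hq'
    · have h0 : PySem.List.pyGetD (PySem.List.pyGetD st.2.1 p.1 []) p.2 0 = 0 := by
        have h1 : gval st.2.1 p = 0 := by rw [henc.2 p hp, if_neg hpV]
        exact h1
      have hstep : aStep clr st p = ((bfs st.1 st.2.1 p.1 p.2 clr).2.2,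
          (bfs st.1 st.2.1 p.1 p.2 clr).2.1, st.2.2 + (bfs st.1 st.2.1 p.1 p.2 clr).1) := by
        unfold aStep
        rw [if_pos h0]
      obtain ⟨S, hgood, hval, henc', hsh', hagree⟩ :=
        bfs_good arr0 st.1 V st.2.1 hVnd hVg harr hsh henc p hp hpV clr
      have hVS : OuterInv arr0 (V ++ S) (aStep clr st p) := by
        rw [hstep]
        refine ⟨?_, ?_, ?_, henc', hsh', hagree, ?_⟩
        · rw [List.nodup_append]
          exact ⟨hVnd, hgood.2.1, fun a ha b hb hab => hgood.2.2.2.1 b hb (hab ▸ ha)⟩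
        · intro x hx
          rcases List.mem_append.1 hx with h | h
          · exact hVg x h
          · exact hgood.2.2.1 x h
        · intro a ha b hb
          rcases List.mem_append.1 ha with h | h
          · exact List.mem_append_left _ (hVcl a h b hb)
          · rcases hgood.2.2.2.2.2 a h b hb with h' | h'
            · exact List.mem_append_left _ h'
            · exact List.mem_append_right _ h'
        · show st.2.2 + (bfs st.1 st.2.1 p.1 p.2 clr).1 = _
          rw [hcnt, hval, List.filter_append, List.length_append]
          rw [← filter_bigC arr0 V hVcl p S hgood]
          push_cast
          ring
      obtain ⟨V', hI, hmono, hall⟩ := ih (aStep clr st p) (V ++ S)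
        (fun q hq => hg q (by simp [hq])) hVS
      refine ⟨V', hI, fun x hx => hmono x (List.mem_append_left _ hx), fun q hq => ?_⟩
      rcases List.mem_cons.1 hq with rfl | hq'
      · exact hmono q (List.mem_append_right _ hgood.1)
      · exact hall q hq'

lemma count_clear_eq_filter (arr : List (List Int)) (clr : Int)
    (hpre : Pre_count_clear arr clr) :
    count_clear arr clr = ((scanCells.filter (bigC arr)).length : Int) := by
  have hInv0 : OuterInv arr []
      (arr, (PySem.List.pyRange 0 5 1).map (fun _ => List.replicate 5 (0 : Int)), (0 : Int)) :=
    ⟨by simp, by simp, fun a ha => absurd ha (List.not_mem_nil), encodes_init,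
      shape_of_pre arr hpre, fun p _ _ => rfl, by simp⟩
  obtain ⟨V', hI, _, hall⟩ := outer_fold arr clr scanCells
    (arr, (PySem.List.pyRange 0 5 1).map (fun _ => List.replicate 5 (0 : Int)), (0 : Int)) []
    (fun p hp => (mem_scanCells_iff p).1 hp) hInv0
  have hfold : count_clear arr clr = (scanCells.foldl (aStep clr)
      ((arr, (PySem.List.pyRange 0 5 1).map (fun _ => List.replicate 5 (0 : Int)), (0 : Int)))).2.2 := by
    unfold count_clear scanCells aStep
    rw [List.foldl_flatMap]
    simp only [List.foldl_map]

  rw [hfold, hI.2.2.2.2.2.2]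
  have hperm : V'.Perm scanCells := (List.perm_ext_iff_of_nodup hI.1 scanCells_nodup).2
    (fun x => ⟨fun hx => (mem_scanCells_iff x).2 (hI.2.1 x hx), fun hx => hall x hx⟩)
  rw [(hperm.filter (bigC arr)).length_eq]

lemma count_clear_alt_eq_filter (arr : List (List Int)) (clr : Int) :
    count_clear_alt arr clr = ((scanCells.filter (bigC arr)).length : Int) := by
  have hsum : ∀ (l : List (Int × Int)) (init : Int),
      l.foldl (fun t p => t + (if 3 ≤ (comp arr p.1 p.2).length then (1 : Int) else 0)) init
        = init + ((l.filter (bigC arr)).length : Int) := by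
    intro l
    induction l with
    | nil => intro init; simp
    | cons p rest ih =>
      intro init
      rw [List.foldl_cons, ih, List.filter_cons]
      by_cases h3 : 3 ≤ (comp arr p.1 p.2).length
      · rw [if_pos h3, if_pos (by unfold bigC; exact decide_eq_true h3)]
        simp only [List.length_cons]
        push_cast
        ring
      · rw [if_neg h3, if_neg (by unfold bigC; simpa using h3)]
        ring
  have hcomps : (PySem.List.pyRange 0 5 1).flatMap (fun i =>
      (PySem.List.pyRange 0 5 1).map (fun j => comp arr i j))
        = scanCells.map (fun p => comp arr p.1 p.2) := by
    unfold scanCells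
    rw [List.map_flatMap]
    simp only [List.map_map]
    rfl
  unfold count_clear_alt
  rw [hcomps, List.foldl_map, hsum scanCells 0]
  ring

-- ===== VERDICT (by name: the statement is the Claim_ definition above) =====
theorem count_clear_spec : Claim_equal_count_clear := by
  intro arr clr _ hpre
  unfold Spec_count_clear
  rw [count_clear_eq_filter arr clr hpre, count_clear_alt_eq_filter arr clr]
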